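-- pv_equiv track=rewrite | github.com/tshardey/Coursework | Bioinformatics/minSkew2.py | maxSkew
-- ===== SOURCE A (Python) =====
-- def maxSkew(sequence):
-- 	c = 0
-- 	g = 0
-- 	min_skew = 0
-- 	skew_list = []
-- 	index = 0
-- 	for i in sequence:
-- 		index += 1
-- 		if i == 'C':
-- 			c += 1
-- 		if i == 'G':
-- 			g += 1
-- 		skew = g-c
-- 		if skew > min_skew:
-- 			skew_list = [index]
-- 			min_skew = skew
-- 		if skew == min_skew and index not in skew_list:
-- 			skew_list.append(index)
-- 	return(skew_list)
-- ===== SOURCE B (Python) =====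
-- def maxSkew(sequence):
--     # pass 1: running maximum of the prefix GC-skew (floored at 0 by starting m at 0)
--     skew = 0
--     m = 0
--     for ch in sequence:
--         skew += (ch == 'G') - (ch == 'C')
--         if skew > m:
--             m = skew
--     # pass 2: collect 1-based positions whose prefix skew equals that maximum
--     out = []
--     skew = 0
--     i = 0
--     for ch in sequence:
--         i += 1
--         skew += (ch == 'G') - (ch == 'C')
--         if skew == m:
--             out.append(i)
--     return out
-- ===== Notes on version B (the rewrite author's own statement) =====
-- stated objective: faster
-- what changed: Replaces A's single online loop that maintains a running max with list resets and a linear list-membership test per character by two plain passes: first compute the maximum prefix skew (floored at 0), then collect all positions attaining it.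
import Mathlib
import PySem

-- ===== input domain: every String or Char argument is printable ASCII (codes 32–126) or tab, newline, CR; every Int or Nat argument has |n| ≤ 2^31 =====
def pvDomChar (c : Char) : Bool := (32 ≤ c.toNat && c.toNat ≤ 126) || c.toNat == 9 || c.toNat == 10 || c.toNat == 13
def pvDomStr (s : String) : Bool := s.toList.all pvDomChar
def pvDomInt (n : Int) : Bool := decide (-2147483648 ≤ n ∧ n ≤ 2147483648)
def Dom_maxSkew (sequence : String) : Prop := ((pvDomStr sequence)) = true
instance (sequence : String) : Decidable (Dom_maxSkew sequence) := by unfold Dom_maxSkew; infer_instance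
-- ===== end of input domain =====

-- B replaces A's online running-max loop (with list resets and a membership scan) by two
-- plain passes: compute the maximum prefix skew, then collect the positions attaining it.

-- ===== PORT A =====
-- A's single loop: state (c, g, min_skew, skew_list, index)
def maxSkewLoop : List Char → Int → Int → Int → List Int → Int → List Int
  | [], _, _, _, lst, _ => lst
  | ch :: t, c, g, ms, lst, idx =>
    let idx' := idx + 1
    let c' := if ch = 'C' then c + 1 else c
    let g' := if ch = 'G' then g + 1 else g
    let skew := g' - c'
    let p := if skew > ms then (([idx'] : List Int), skew) else (lst, ms)
    let lst2 := if skew = p.2 ∧ ¬ (idx' ∈ p.1) then p.1 ++ [idx'] else p.1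
    maxSkewLoop t c' g' p.2 lst2 idx'

def maxSkew (sequence : String) : List Int :=
  maxSkewLoop sequence.toList 0 0 0 [] 0

-- ===== PORT B =====
-- pass 1: running maximum of the prefix skew, state (skew, m)
def altMaxLoop : List Char → Int → Int → Int
  | [], _, m => m
  | ch :: t, s, m =>
    let s' := s + (if ch = 'G' then 1 else 0) - (if ch = 'C' then 1 else 0)
    altMaxLoop t s' (if s' > m then s' else m)

-- pass 2: collect positions whose prefix skew equals m, state (skew, i, out)
def altCollectLoop : List Char → Int → Int → Int → List Int → List Int
  | [], _, _, _, out => out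
  | ch :: t, m, s, i, out =>
    let i' := i + 1
    let s' := s + (if ch = 'G' then 1 else 0) - (if ch = 'C' then 1 else 0)
    altCollectLoop t m s' i' (if s' = m then out ++ [i'] else out)

def maxSkew_alt (sequence : String) : List Int :=
  let m := altMaxLoop sequence.toList 0 0
  altCollectLoop sequence.toList m 0 0 []

-- ===== PRECONDITION & SPEC =====
def Spec_maxSkew (sequence : String) (out : List Int) : Prop := out = maxSkew_alt sequence
instance (sequence : String) (out : List Int) : Decidable (Spec_maxSkew sequence out) := by unfold Spec_maxSkew; infer_instance

-- ===== CLAIM (what is proved, stated in full; the proofs are below) =====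
def Claim_equal_maxSkew : Prop := ∀ (sequence : String), Dom_maxSkew sequence → Spec_maxSkew sequence (maxSkew sequence)

-- ===== LEMMAS AND PROOFS =====

-- one character's contribution to the skew
def skewStep (s : Int) (ch : Char) : Int :=
  s + (if ch = 'G' then 1 else 0) - (if ch = 'C' then 1 else 0)

-- specification form: positions (1-based, offset idx) whose prefix skew equals M
def collectSpec (M : Int) : Int → Int → List Char → List Int
  | _, _, [] => []
  | s, i, ch :: t =>
    (if skewStep s ch = M then [i + 1] else []) ++ collectSpec M (skewStep s ch) (i + 1) t

theorem altMaxLoop_cons (ch : Char) (t : List Char) (s m : Int) :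
    altMaxLoop (ch :: t) s m =
      altMaxLoop t (skewStep s ch) (if skewStep s ch > m then skewStep s ch else m) := rfl

theorem maxSkewLoop_cons (ch : Char) (t : List Char) (c g ms : Int) (lst : List Int)
    (idx sk : Int)
    (hsk : sk = (if ch = 'G' then g + 1 else g) - (if ch = 'C' then c + 1 else c)) :
    maxSkewLoop (ch :: t) c g ms lst idx =
      if sk > ms then
        maxSkewLoop t (if ch = 'C' then c + 1 else c) (if ch = 'G' then g + 1 else g) sk
          [idx + 1] (idx + 1)
      else
        maxSkewLoop t (if ch = 'C' then c + 1 else c) (if ch = 'G' then g + 1 else g) ms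
          (if sk = ms ∧ ¬ ((idx + 1) ∈ lst) then lst ++ [idx + 1] else lst) (idx + 1) := by
  subst hsk
  simp only [maxSkewLoop]
  by_cases h : ((if ch = 'G' then g + 1 else g) - (if ch = 'C' then c + 1 else c)) > ms
  · simp [if_pos h]
  · simp [if_neg h]

theorem altMaxLoop_ge : ∀ (l : List Char) (s m : Int), m ≤ altMaxLoop l s m := by
  intro l
  induction l with
  | nil => intro s m; simp [altMaxLoop]
  | cons ch t ih =>
    intro s m
    rw [altMaxLoop_cons]
    refine le_trans ?_ (ih _ _)
    split <;> omega

theorem altCollectLoop_spec :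
    ∀ (l : List Char) (m s i : Int) (out : List Int),
      altCollectLoop l m s i out = out ++ collectSpec m s i l := by
  intro l
  induction l with
  | nil => intro m s i out; simp [altCollectLoop, collectSpec]
  | cons ch t ih =>
    intro m s i out
    simp only [altCollectLoop, collectSpec, skewStep]
    rw [ih]
    by_cases h : s + (if ch = 'G' then (1 : Int) else 0) - (if ch = 'C' then 1 else 0) = m
    · rw [if_pos h, if_pos h]; simp
    · rw [if_neg h, if_neg h]; simp

theorem maxSkewLoop_spec :
    ∀ (l : List Char) (c g ms idx : Int) (lst : List Int),
      (∀ j ∈ lst, j ≤ idx) →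
      maxSkewLoop l c g ms lst idx =
        (if altMaxLoop l (g - c) ms = ms then lst else []) ++
          collectSpec (altMaxLoop l (g - c) ms) (g - c) idx l := by
  intro l
  induction l with
  | nil => intro c g ms idx lst _; simp [maxSkewLoop, altMaxLoop, collectSpec]
  | cons ch t ih =>
    intro c g ms idx lst hle
    have hstep : (if ch = 'G' then g + 1 else g) - (if ch = 'C' then c + 1 else c)
        = skewStep (g - c) ch := by
      simp only [skewStep]; split_ifs <;> omega
    rw [maxSkewLoop_cons ch t c g ms lst idx (skewStep (g - c) ch) hstep.symm,
        altMaxLoop_cons]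
    by_cases hgt : skewStep (g - c) ch > ms
    · rw [if_pos hgt, if_pos hgt]
      rw [ih _ _ _ _ _ (by intro j hj; simp at hj; omega), hstep]
      have hge := altMaxLoop_ge t (skewStep (g - c) ch) (skewStep (g - c) ch)
      rw [if_neg (by omega : ¬ altMaxLoop t (skewStep (g - c) ch) (skewStep (g - c) ch) = ms)]
      simp only [collectSpec, List.nil_append]
      rcases eq_or_ne (altMaxLoop t (skewStep (g - c) ch) (skewStep (g - c) ch))
          (skewStep (g - c) ch) with h | h
      · rw [if_pos h, if_pos h.symm]
      · rw [if_neg h, if_neg (Ne.symm h)]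
    · rw [if_neg hgt, if_neg hgt]
      have hge := altMaxLoop_ge t (skewStep (g - c) ch) ms
      by_cases heq : skewStep (g - c) ch = ms
      · rw [if_pos (show skewStep (g - c) ch = ms ∧ ¬ ((idx + 1) ∈ lst) from
            ⟨heq, fun hm => absurd (hle _ hm) (by omega)⟩)]
        rw [ih _ _ _ _ _ (by
          intro j hj
          rcases List.mem_append.mp hj with h | h
          · have := hle _ h; omega
          · simp at h; omega), hstep]
        simp only [collectSpec]
        rcases eq_or_ne (altMaxLoop t (skewStep (g - c) ch) ms) ms with h | h
        · rw [if_pos h, if_pos h, if_pos (heq.trans h.symm)]; simp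
        · have hne : ¬ (skewStep (g - c) ch = altMaxLoop t (skewStep (g - c) ch) ms) := by
            omega
          rw [if_neg h, if_neg h, if_neg hne]; simp
      · rw [if_neg (show ¬ (skewStep (g - c) ch = ms ∧ ¬ ((idx + 1) ∈ lst)) from
            fun hc => heq hc.1)]
        rw [ih _ _ _ _ _ (by intro j hj; have := hle _ hj; omega), hstep]
        simp only [collectSpec]
        have hne : ¬ (skewStep (g - c) ch = altMaxLoop t (skewStep (g - c) ch) ms) := by
          omega
        rw [if_neg hne]
        simp

-- ===== VERDICT (by name: the statement is the Claim_ definition above) =====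
theorem maxSkew_spec : Claim_equal_maxSkew := by
  intro sequence _
  show maxSkew sequence = maxSkew_alt sequence
  unfold maxSkew maxSkew_alt
  rw [maxSkewLoop_spec _ 0 0 0 0 [] (by simp)]
  rw [altCollectLoop_spec]
  simp
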